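-- pv_equiv track=rewrite | github.com/industrydive/proper-gator | proper_gator/variables.py | create_variable_body
-- ===== SOURCE A (Python) =====
-- def create_variable_body(variable):
--     """Given a variable, remove all keys that are specific to that variable
--     and return keys + values that can be used to clone another variable
--
--     https://googleapis.github.io/google-api-python-client/docs/dyn/variablemanager_v2.accounts.containers.workspaces.variables.html#create
--
--     :param variable: The variable to convert into a request body
--     :type variable: dict
--     :return: A request body to be used in the create variable method
--     :rtype: dict
--     """
--     body = {}
--     non_mutable_keys = [
--         "accountId",
--         "containerId",
--         "fingerprint",
--         "parentFolderId",
--         "path",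
--         "tagManagerUrl",
--         "variableId",
--         "workspaceId",
--     ]
--
--     for k, v in variable.items():
--         if k not in non_mutable_keys:
--             body[k] = v
--     return body
-- ===== SOURCE B (Python) =====
-- def create_variable_body(variable):
--     """Shallow-copy the variable and pop each non-mutable key from the copy."""
--     body = dict(variable)
--     body.pop("accountId", None)
--     body.pop("containerId", None)
--     body.pop("fingerprint", None)
--     body.pop("parentFolderId", None)
--     body.pop("path", None)
--     body.pop("tagManagerUrl", None)
--     body.pop("variableId", None)
--     body.pop("workspaceId", None)
--     return body
-- ===== Notes on version B (the rewrite author's own statement) =====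
-- stated objective: simpler
-- what changed: B copies the dict once and pops the eight fixed non-mutable keys from the copy, instead of scanning every item of the input and testing each key against a blocklist.
import Mathlib
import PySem

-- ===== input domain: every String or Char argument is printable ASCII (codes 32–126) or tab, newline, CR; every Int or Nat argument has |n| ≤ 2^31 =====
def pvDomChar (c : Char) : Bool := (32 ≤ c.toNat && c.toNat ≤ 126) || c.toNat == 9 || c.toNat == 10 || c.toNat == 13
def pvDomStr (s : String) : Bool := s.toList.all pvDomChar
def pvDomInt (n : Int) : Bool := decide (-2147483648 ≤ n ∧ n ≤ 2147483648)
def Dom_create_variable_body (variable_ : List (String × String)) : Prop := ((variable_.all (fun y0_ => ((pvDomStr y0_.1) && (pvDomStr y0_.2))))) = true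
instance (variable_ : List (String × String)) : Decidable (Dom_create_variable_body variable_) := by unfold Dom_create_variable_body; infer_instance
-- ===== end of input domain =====

-- B shallow-copies the dict and pops the eight fixed non-mutable keys from the copy,
-- instead of A's item-by-item scan with a blocklist membership test (simpler; return value only).

-- ===== PORT A =====
-- the blocklist A builds: non_mutable_keys = [...]
def nonMutableKeys : List String :=
  ["accountId", "containerId", "fingerprint", "parentFolderId",
   "path", "tagManagerUrl", "variableId", "workspaceId"]

-- body = {}; for k, v in variable.items(): if k not in non_mutable_keys: body[k] = v; return body
def create_variable_body (variable_ : List (String × String)) : List (String × String) :=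
  (variable_.foldl
    (fun body p => if !nonMutableKeys.contains p.1 then body.insert p.1 p.2 else body)
    (PySem.Dict.empty : PySem.Dict String String)).items

-- ===== PORT B =====
-- body = dict(variable); body.pop("accountId", None); …; body.pop("workspaceId", None); return body
def create_variable_body_alt (variable_ : List (String × String)) : List (String × String) :=
  ((((((((((PySem.Dict.ofList variable_).erase "accountId").erase "containerId").erase
      "fingerprint").erase "parentFolderId").erase "path").erase "tagManagerUrl").erase
      "variableId").erase "workspaceId")).items

-- ===== PRECONDITION & SPEC =====
def Spec_create_variable_body (variable_ : List (String × String)) (out : List (String × String)) : Prop := out = create_variable_body_alt variable_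
instance (variable_ : List (String × String)) (out : List (String × String)) : Decidable (Spec_create_variable_body variable_ out) := by unfold Spec_create_variable_body; infer_instance

-- ===== CLAIM (what is proved, stated in full; the proofs are below) =====
def Claim_equal_create_variable_body : Prop := ∀ (variable_ : List (String × String)), Dom_create_variable_body variable_ → Spec_create_variable_body variable_ (create_variable_body variable_)

-- ===== LEMMAS AND PROOFS =====

-- the key-level filter both sides compute
def qKeep (p : String × String) : Bool := !nonMutableKeys.contains p.1

-- erasing each key of ks in turn filters the items by ks
theorem erase_foldl_items (ks : List String) (d : PySem.Dict String String) :
    (ks.foldl (fun body k => body.erase k) d).items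
      = d.items.filter (fun p => !ks.contains p.1) := by
  induction ks generalizing d with
  | nil => simp
  | cons k ks ih =>
      rw [List.foldl_cons, ih]
      simp only [PySem.Dict.erase, List.filter_filter]
      apply List.filter_congr
      intro p _
      simp only [List.contains_cons, Bool.not_or]
      rw [Bool.and_comm, BEq.comm]

-- inserting a kept key commutes with filtering the items by qKeep
theorem insert_items_filter_keep (d e : PySem.Dict String String) (k : String) (v : String)
    (hk : (!nonMutableKeys.contains k) = true)
    (h : e.items = d.items.filter qKeep) :
    (e.insert k v).items = (d.insert k v).items.filter qKeep := by
  have hc : e.contains k = d.contains k := by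
    simp only [PySem.Dict.contains, h, List.any_filter]
    congr 1
    funext p
    by_cases hpk : p.1 = k
    · have hk'' : k ∉ nonMutableKeys := by simpa using hk
      simp [qKeep, hpk, hk'']
    · simp [hpk]
  have hkv : qKeep (k, v) = true := hk
  simp only [PySem.Dict.insert, hc]
  split
  · dsimp only
    rw [h, List.filter_map]
    refine congrArg _ (List.filter_congr ?_)
    intro p _
    by_cases hpk : p.1 = k
    · simp [Function.comp, qKeep, hpk]
    · simp [Function.comp, hpk]
  · simp [h, List.filter_append, hkv]

-- inserting a blocked key leaves the qKeep-filtered items unchanged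
theorem insert_items_filter_drop (d : PySem.Dict String String) (k : String) (v : String)
    (hk : (!nonMutableKeys.contains k) = false) :
    (d.insert k v).items.filter qKeep = d.items.filter qKeep := by
  have hk' : k ∈ nonMutableKeys := by simpa using hk
  simp only [PySem.Dict.insert]
  split
  · rw [List.filter_map]
    have hq : ∀ p : String × String,
        (qKeep ∘ (fun p : String × String => if (p.1 == k) = true then (k, v) else p)) p = qKeep p := by
      intro p
      by_cases hpk : p.1 = k
      · simp [Function.comp, hpk, qKeep, hk']
      · simp [Function.comp, hpk]
    rw [List.filter_congr (fun p _ => hq p)]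
    have hid : ∀ p ∈ d.items.filter qKeep,
        (fun p : String × String => if (p.1 == k) = true then (k, v) else p) p = p := by
      intro p hp
      have hp' : p.1 ∉ nonMutableKeys := by
        simpa [qKeep] using (List.mem_filter.mp hp).2
      have hpk : p.1 ≠ k := fun hc => hp' (hc ▸ hk')
      simp [hpk]
    rw [List.map_congr_left hid]
    simp
  · simp [List.filter_append, qKeep, hk']

-- main invariant: folding the kept items into a filtered dict tracks the full fold, filtered
theorem fold_filter_invariant (xs : List (String × String)) (d e : PySem.Dict String String)
    (h : e.items = d.items.filter qKeep) :
    ((xs.filter qKeep).foldl (fun body p => body.insert p.1 p.2) e).items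
      = ((xs.foldl (fun body p => body.insert p.1 p.2) d).items).filter qKeep := by
  induction xs generalizing d e with
  | nil => simpa using h
  | cons p xs ih =>
      by_cases hq : qKeep p = true
      · rw [List.filter_cons_of_pos hq]
        simp only [List.foldl_cons]
        exact ih _ _ (insert_items_filter_keep d e p.1 p.2 hq h)
      · have hq' : qKeep p = false := by simpa using hq
        rw [List.filter_cons_of_neg hq]
        simp only [List.foldl_cons]
        exact ih _ _ (h.trans (insert_items_filter_drop d p.1 p.2 hq').symm)

-- B's nested erases ARE the erase-fold over the literal blocklist
theorem alt_eq_erase_fold (variable_ : List (String × String)) :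
    create_variable_body_alt variable_
      = (nonMutableKeys.foldl (fun body k => body.erase k)
          (PySem.Dict.ofList variable_)).items := by
  simp [create_variable_body_alt, nonMutableKeys, List.foldl]

-- ===== VERDICT (by name: the statement is the Claim_ definition above) =====
theorem create_variable_body_spec : Claim_equal_create_variable_body := by
  intro variable_ _
  unfold Spec_create_variable_body
  rw [alt_eq_erase_fold, erase_foldl_items]
  unfold create_variable_body
  rw [show (fun (body : PySem.Dict String String) (p : String × String) =>
        if !nonMutableKeys.contains p.1 then body.insert p.1 p.2 else body)
      = (fun body p => if qKeep p then body.insert p.1 p.2 else body) from rfl]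
  rw [PySem.List.foldl_if_eq_foldl_filter]
  rw [show PySem.Dict.ofList variable_
      = variable_.foldl (fun body p => body.insert p.1 p.2) PySem.Dict.empty from rfl]
  exact fold_filter_invariant variable_ PySem.Dict.empty PySem.Dict.empty
    (by simp [PySem.Dict.empty])
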